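-- pv_equiv track=rewrite | github.com/pmaddi/euler | problem_17.py | num_letter_counts
-- ===== SOURCE A (Python) =====
-- import math
--
-- def produce(num, cache):
--     if num in cache:
--         return cache[num]
--     length = int(math.log10(num)) + 1
--     if length == 2:
--         ones = num % 10
--         tens = num - ones
--         val = cache[tens] + '-' + cache[ones]
--         cache[num] = val
--         return val
--
--     elif length == 3:
--         hundreds = ((num // (10 ** 2)) % 10)
--         rest_num = num - (hundreds * 100)
--         rest = ''
--         if rest_num:
--             rest = ' and ' + cache[rest_num]
--         val = cache[hundreds] + ' hundred' + rest
--         cache[num] = val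
--         return val
--     else:
--         assert(False)
--
-- def num_letter_counts(n):
--     cache = {
--             1: 'one',
--             2: 'two',
--             3: 'three',
--             4: 'four',
--             5: 'five',
--             6: 'six',
--             7: 'seven',
--             8: 'eight',
--             9: 'nine',
--             10: 'ten',
--             11: 'eleven',
--             12: 'twelve',
--             13: 'thirteen',
--             14: 'fourteen',
--             15: 'fifteen',
--             16: 'sixteen',
--             17: 'seventeen',
--             18: 'eighteen',
--             19: 'nineteen',
--             20: 'twenty',
--             30: 'thirty',
--             40: 'forty',
--             50: 'fifty',
--             60: 'sixty',
--             70: 'seventy',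
--             80: 'eighty',
--             90: 'ninety',
--             100: 'one hundred',
--             1000: 'one thousand'
--             }
--     ct = ''
--     for i in range(1, n + 1):
--         st = produce(i, cache)
--         st = st.replace(' ', '').replace('-', '')
--         ct += st
--     return len(ct)
-- ===== SOURCE B (Python) =====
-- def num_letter_counts(n):
--     # Letter counts by arithmetic digit decomposition; no strings, no cache.
--     ones = [0, 3, 3, 5, 4, 4, 3, 5, 5, 4, 3, 6, 6, 8, 8, 7, 7, 9, 8, 8]
--     tens = [0, 0, 6, 6, 5, 5, 5, 7, 6, 6]
--
--     def letters(i):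
--         if i == 1000:
--             return 11  # "one thousand"
--         h, r = divmod(i, 100)
--         total = 0
--         if h:
--             total += ones[h] + 7  # "<h> hundred"
--             if r:
--                 total += 3  # "and"
--         if r < 20:
--             total += ones[r]
--         else:
--             total += tens[r // 10] + ones[r % 10]
--         return total
--
--     return sum(letters(i) for i in range(1, n + 1))
-- ===== Notes on version B (the rewrite author's own statement) =====
-- stated objective: simpler
-- what changed: Replaces A's memoised string machinery (spell each number via a dict cache, strip spaces/hyphens, concatenate everything, take len) by a single arithmetic pass that adds precomputed letter counts from ones/tens tables via digit decomposition, never building a string.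
import Mathlib
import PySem

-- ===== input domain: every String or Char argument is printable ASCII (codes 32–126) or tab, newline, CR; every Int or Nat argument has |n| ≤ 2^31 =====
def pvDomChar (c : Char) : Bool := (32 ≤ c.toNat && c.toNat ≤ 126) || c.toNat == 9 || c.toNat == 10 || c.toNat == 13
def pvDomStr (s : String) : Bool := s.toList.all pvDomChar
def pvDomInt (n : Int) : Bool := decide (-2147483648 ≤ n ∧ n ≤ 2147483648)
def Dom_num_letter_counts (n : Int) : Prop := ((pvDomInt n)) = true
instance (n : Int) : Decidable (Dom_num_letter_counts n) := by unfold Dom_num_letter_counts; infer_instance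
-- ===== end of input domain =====

-- B replaces A's memoised string-building (spell every number, strip, concatenate, measure)
-- by a table-driven arithmetic digit decomposition that only adds letter counts.

-- ===== PORT A =====
-- the initial cache literal from A
def initCacheA : PySem.Dict Int String := PySem.Dict.ofList
  [(1, "one"), (2, "two"), (3, "three"), (4, "four"), (5, "five"), (6, "six"),
   (7, "seven"), (8, "eight"), (9, "nine"), (10, "ten"), (11, "eleven"), (12, "twelve"),
   (13, "thirteen"), (14, "fourteen"), (15, "fifteen"), (16, "sixteen"), (17, "seventeen"),
   (18, "eighteen"), (19, "nineteen"), (20, "twenty"), (30, "thirty"), (40, "forty"),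
   (50, "fifty"), (60, "sixty"), (70, "seventy"), (80, "eighty"), (90, "ninety"),
   (100, "one hundred"), (1000, "one thousand")]

-- hand port of `int(math.log10(num)) + 1` (a float computation): exact for 1 ≤ num ≤ 9999,
-- and every call produce makes from the loop has 1 ≤ num ≤ 1000.
def logLenA (num : Int) : Int :=
  if num < 10 then 1 else if num < 100 then 2 else if num < 1000 then 3 else 4

-- produce(num, cache): returns the value and the updated cache.
-- `cache[k]` is ported as `getD k ""`: for n ≤ 1000 every key the loop asks for is already
-- cached (numbers are produced in increasing order), so Python's KeyError case is unreachable;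
-- the `assert(False)` arm (an uncached 4+-digit number) raises in Python and is excluded by Pre_.
def produceA (num : Int) (cache : PySem.Dict Int String) : String × PySem.Dict Int String :=
  match cache.get? num with
  | some v => (v, cache)
  | none =>
    let length := logLenA num
    if length = 2 then
      let ones := PySem.Int.mod num 10
      let tens := num - ones
      let val := cache.getD tens "" ++ "-" ++ cache.getD ones ""
      (val, cache.insert num val)
    else if length = 3 then
      let hundreds := PySem.Int.mod (PySem.Int.floordiv num (10 ^ 2)) 10
      let rest_num := num - hundreds * 100
      let rest := if rest_num ≠ 0 then " and " ++ cache.getD rest_num "" else ""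
      let val := cache.getD hundreds "" ++ " hundred" ++ rest
      (val, cache.insert num val)
    else ("", cache)  -- assert(False): A raises here; unreachable under Pre_

def num_letter_counts (n : Int) : Int :=
  let res := (PySem.List.pyRange 1 (n + 1) 1).foldl
    (fun (st : PySem.Dict Int String × String) i =>
      let p := produceA i st.1
      (p.2, st.2 ++ PySem.Str.replace (PySem.Str.replace p.1 " " "") "-" ""))
    (initCacheA, "")
  PySem.Str.len res.2

-- ===== PORT B =====
def onesTblB : List Int := [0, 3, 3, 5, 4, 4, 3, 5, 5, 4, 3, 6, 6, 8, 8, 7, 7, 9, 8, 8]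
def tensTblB : List Int := [0, 0, 6, 6, 5, 5, 5, 7, 6, 6]

-- letters(i) of Source B; list indexing ported as pyGetD (in range for every i the loop reaches under Pre_).
def lettersB (i : Int) : Int :=
  if i = 1000 then 11
  else
    let h := PySem.Int.floordiv i 100
    let r := PySem.Int.mod i 100
    let total : Int := 0
    let total := if h ≠ 0 then total + PySem.List.pyGetD onesTblB h 0 + 7 + (if r ≠ 0 then 3 else 0) else total
    if r < 20 then total + PySem.List.pyGetD onesTblB r 0
    else total + PySem.List.pyGetD tensTblB (PySem.Int.floordiv r 10) 0 + PySem.List.pyGetD onesTblB (PySem.Int.mod r 10) 0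

def num_letter_counts_alt (n : Int) : Int :=
  (PySem.List.pyRange 1 (n + 1) 1).foldl (fun acc i => acc + lettersB i) 0

-- ===== PRECONDITION & SPEC =====
-- A raises AssertionError (produce's assert(False)) as soon as the loop reaches a 4-digit
-- number other than 1000, i.e. for every n ≥ 1001; Pre_ excludes exactly those inputs.
def Pre_num_letter_counts (n : Int) : Prop := n ≤ 1000
instance (n : Int) : Decidable (Pre_num_letter_counts n) := by unfold Pre_num_letter_counts; infer_instance
def pvWitness_num_letter_counts : Int := 342

def Spec_num_letter_counts (n : Int) (out : Int) : Prop := out = num_letter_counts_alt n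
instance (n : Int) (out : Int) : Decidable (Spec_num_letter_counts n out) := by unfold Spec_num_letter_counts; infer_instance

-- ===== CLAIM (what is proved, stated in full; the proofs are below) =====
def Claim_equal_num_letter_counts : Prop := ∀ (n : Int), Dom_num_letter_counts n → Pre_num_letter_counts n → Spec_num_letter_counts n (num_letter_counts n)

-- ===== LEMMAS AND PROOFS =====

-- floordiv/mod with a nonnegative divisor are ediv/emod (omega-friendly)
theorem fd_eq (a b : Int) (hb : 0 ≤ b) : PySem.Int.floordiv a b = a / b := by
  simp [PySem.Int.floordiv, Int.fdiv_eq_ediv, hb]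

theorem fm_eq (a b : Int) (hb : 0 ≤ b) : PySem.Int.mod a b = a % b := by
  simp [PySem.Int.mod, Int.fmod_eq_emod, hb]

/-- The list [i, i+1, …, i+k-1]. -/
def intsFrom : Int → Nat → List Int
  | _, 0 => []
  | i, k + 1 => i :: intsFrom (i + 1) k

theorem pyRange_eq_intsFrom (k : Nat) : ∀ (i : Int), PySem.List.pyRange i (i + k) 1 = intsFrom i k := by
  induction k with
  | zero => intro i; simp [intsFrom, PySem.List.pyRange_one_eq_nil]
  | succ k ih =>
    intro i
    rw [PySem.List.pyRange_one_cons (by omega : i < i + (k + 1 : Nat))]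
    have : (i + (k + 1 : Nat) : Int) = (i + 1) + k := by push_cast; ring
    rw [this, ih (i + 1)]
    rfl

/-- Letters of `s` that are neither ' ' nor '-': what A's strip-then-measure counts. -/
def cnt (s : String) : Int :=
  (((s.toList.filter (fun c => !(c == ' '))).filter (fun c => !(c == '-'))).length : Int)

theorem replace_go_single (b : Char) : ∀ (l : List Char) (fuel : Nat) (acc : List Char),
    l.length ≤ fuel →
    PySem.Chars.replace.go [b] [] fuel l acc = acc.reverse ++ l.filter (fun c => !(c == b)) := by
  intro l
  induction l with
  | nil =>
    intro fuel acc _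
    cases fuel <;> simp [PySem.Chars.replace.go]
  | cons c t ih =>
    intro fuel acc hle
    cases fuel with
    | zero => simp at hle
    | succ f =>
      rw [PySem.Chars.replace.go]
      have hpre : ([b].isPrefixOf (c :: t)) = (b == c) := by
        simp [List.isPrefixOf]
      by_cases hbc : b = c
      · subst hbc
        rw [hpre]
        simp only [beq_self_eq_true, if_true, List.length_cons, List.length_nil,
          List.drop_succ_cons, List.drop_zero, List.reverse_nil, List.nil_append]
        rw [ih f acc (by simpa using hle)]
        simp
      · rw [hpre]
        have hf : (b == c) = false := by simpa using hbc
        rw [hf]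
        simp only [Bool.false_eq_true, if_false]
        rw [ih f (c :: acc) (by simpa using hle)]
        have : (!(c == b)) = true := by simpa using (Ne.symm hbc)
        simp [this]
theorem replace_single (b : Char) (s : List Char) :
    PySem.Chars.replace s [b] [] = s.filter (fun c => !(c == b)) := by
  rw [PySem.Chars.replace]
  simp only [List.isEmpty_cons, if_neg, Bool.false_eq_true, not_false_iff]
  simpa using replace_go_single b s s.length [] le_rfl

theorem strip_cnt (s : String) :
    PySem.Str.len (PySem.Str.replace (PySem.Str.replace s " " "") "-" "") = cnt s := by
  have h1 : (" " : String).toList = [' '] := rfl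
  have h2 : ("-" : String).toList = ['-'] := rfl
  have h3 : ("" : String).toList = [] := rfl
  rw [PySem.Str.len_eq, PySem.Str.toList_replace, PySem.Str.toList_replace, h1, h2, h3,
    replace_single, replace_single, cnt]

theorem cnt_append (a b : String) : cnt (a ++ b) = cnt a + cnt b := by
  simp [cnt, List.filter_append]

-- the base word for a cached number
def wordA (i : Int) : String := initCacheA.getD i ""

/-- The string produce returns for 1 ≤ i ≤ 99 (given all smaller numbers processed). -/
def spell2 (i : Int) : String :=
  match initCacheA.get? i with
  | some v => v
  | none => wordA (i - PySem.Int.mod i 10) ++ "-" ++ wordA (PySem.Int.mod i 10)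

/-- The string produce returns for 1 ≤ i ≤ 1000 (given all smaller numbers processed). -/
def spell (i : Int) : String :=
  match initCacheA.get? i with
  | some v => v
  | none =>
    if logLenA i = 2 then spell2 i
    else
      wordA (PySem.Int.mod (PySem.Int.floordiv i (10 ^ 2)) 10) ++ " hundred" ++
        (if i - (PySem.Int.mod (PySem.Int.floordiv i (10 ^ 2)) 10) * 100 ≠ 0 then
          " and " ++ spell2 (i - (PySem.Int.mod (PySem.Int.floordiv i (10 ^ 2)) 10) * 100)
        else "")

/-- Cache invariant after the loop has processed 1..m: base keys untouched,
    processed non-base keys hold their spelling, nothing else present. -/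
def CacheInv (m : Int) (c : PySem.Dict Int String) : Prop :=
  ∀ j : Int, c.get? j =
    if initCacheA.get? j = none ∧ 1 ≤ j ∧ j ≤ m then some (spell j) else initCacheA.get? j

theorem Inv_init : CacheInv 0 initCacheA := by
  intro j
  split_ifs with h
  · omega
  · rfl

-- membership facts about the initial cache, by bounded enumeration
theorem init_none_big_aux :
    ((List.range 1000).all fun j =>
      !(decide (101 ≤ j) && decide (j ≤ 999)) || (initCacheA.get? (j : Int) == none)) = true := by
  set_option maxRecDepth 10000 in decide

theorem init_none_of (i : Int) (h1 : 101 ≤ i) (h2 : i ≤ 999) : initCacheA.get? i = none := by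
  have hj : i = ((i.toNat : Nat) : Int) := by omega
  have hmem : i.toNat ∈ List.range 1000 := List.mem_range.mpr (by omega)
  have := List.all_eq_true.mp init_none_big_aux _ hmem
  simp only [Bool.or_eq_true, Bool.not_eq_true', Bool.and_eq_false_iff, beq_iff_eq,
    decide_eq_false_iff_not, not_le] at this
  rcases this with (h | h) | h
  · omega
  · omega
  · rw [hj, h]

theorem init_isSome_small (i : Int) (h1 : 1 ≤ i) (h2 : i ≤ 20) :
    (initCacheA.get? i).isSome := by
  interval_cases i <;> decide

theorem init_isSome_tens (i : Int) (h1 : 20 ≤ i) (h2 : i ≤ 99) (h3 : i % 10 = 0) :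
    (initCacheA.get? i).isSome := by
  have : ∃ d : Int, 2 ≤ d ∧ d ≤ 9 ∧ i = 10 * d := ⟨i / 10, by omega, by omega, by omega⟩
  obtain ⟨d, hd1, hd2, rfl⟩ := this
  interval_cases d <;> decide

theorem init_isSome_100 : (initCacheA.get? 100).isSome := by decide
theorem init_isSome_1000 : (initCacheA.get? 1000).isSome := by decide

-- One step of A's loop: produce returns the spelling and preserves the invariant.
theorem produce_step (i : Int) (c : PySem.Dict Int String) (h1 : 1 ≤ i) (h2 : i ≤ 1000)
    (hInv : CacheInv (i - 1) c) :
    (produceA i c).1 = spell i ∧ CacheInv i (produceA i c).2 := by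
  have hci : c.get? i = initCacheA.get? i := by
    have := hInv i
    rwa [if_neg (by omega : ¬ (initCacheA.get? i = none ∧ 1 ≤ i ∧ i ≤ i - 1))] at this
  cases hbase : initCacheA.get? i with
  | some v =>
    have hp : produceA i c = (v, c) := by
      simp only [produceA, hci, hbase]
    rw [hp]
    constructor
    · simp only [spell, hbase]
    · intro j
      rw [hInv j]
      by_cases hj : j = i
      · subst hj
        rw [if_neg (by simp [hbase]), if_neg (by simp [hbase])]
      · by_cases hc1 : initCacheA.get? j = none ∧ 1 ≤ j ∧ j ≤ i - 1
        · rw [if_pos hc1, if_pos ⟨hc1.1, hc1.2.1, by omega⟩]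
        · rw [if_neg hc1, if_neg (by intro h; exact hc1 ⟨h.1, h.2.1, by omega⟩)]
  | none =>
    have hn20 : ¬ (1 ≤ i ∧ i ≤ 20) := by
      intro h
      have := init_isSome_small i h.1 h.2
      rw [hbase] at this; simp at this
    have hnT : ¬ (20 ≤ i ∧ i ≤ 99 ∧ i % 10 = 0) := by
      intro h
      have := init_isSome_tens i h.1 h.2.1 h.2.2
      rw [hbase] at this; simp at this
    have hn100 : i ≠ 100 := by
      intro h; subst h
      have := init_isSome_100; rw [hbase] at this; simp at this
    have hn1000 : i ≠ 1000 := by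
      intro h; subst h
      have := init_isSome_1000; rw [hbase] at this; simp at this
    have hgetD : ∀ t : Int, (initCacheA.get? t).isSome → c.getD t "" = wordA t := by
      intro t ht
      have hct : c.get? t = initCacheA.get? t := by
        have := hInv t
        rwa [if_neg (by rw [Option.isSome_iff_ne_none] at ht; tauto)] at this
      rw [PySem.Dict.getD, hct]; rfl
    by_cases hlen : i ≤ 99
    · -- two-digit branch
      have hib : 21 ≤ i := by omega
      have hmod : i % 10 ≠ 0 := by intro h; exact hnT ⟨by omega, hlen, h⟩
      have hlog : logLenA i = 2 := by rw [logLenA]; rw [if_neg (by omega), if_pos (by omega)]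
      have hones : PySem.Int.mod i 10 = i % 10 := fm_eq i 10 (by norm_num)
      have hsT : (initCacheA.get? (i - PySem.Int.mod i 10)).isSome := by
        rw [hones]; exact init_isSome_tens _ (by omega) (by omega) (by omega)
      have hsO : (initCacheA.get? (PySem.Int.mod i 10)).isSome := by
        rw [hones]; exact init_isSome_small _ (by omega) (by omega)
      have hval : c.getD (i - PySem.Int.mod i 10) "" ++ "-" ++ c.getD (PySem.Int.mod i 10) ""
          = spell2 i := by
        rw [hgetD _ hsT, hgetD _ hsO]
        simp only [spell2, hbase]
      rw [hones] at hval
      have hp : produceA i c =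
          (spell2 i, c.insert i (spell2 i)) := by
        simp only [produceA, hci, hbase, hlog]
        norm_num
        exact ⟨hval, by rw [hval]⟩
      have hspell : spell i = spell2 i := by simp only [spell, hbase, if_pos hlog]
      rw [hp]
      refine ⟨hspell.symm, ?_⟩
      intro j
      by_cases hj : j = i
      · subst hj
        rw [PySem.Dict.get?_insert_self, if_pos ⟨hbase, by omega, le_refl j⟩, hspell]
      · rw [PySem.Dict.get?_insert_of_ne _ _ hj, hInv j]
        by_cases hc1 : initCacheA.get? j = none ∧ 1 ≤ j ∧ j ≤ i - 1
        · rw [if_pos hc1, if_pos ⟨hc1.1, hc1.2.1, by omega⟩]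
        · rw [if_neg hc1, if_neg (by intro h; exact hc1 ⟨h.1, h.2.1, by omega⟩)]
    · -- three-digit branch
      have hib : 101 ≤ i := by omega
      have hi999 : i ≤ 999 := by omega
      have hlog2 : logLenA i ≠ 2 := by rw [logLenA]; rw [if_neg (by omega), if_neg (by omega), if_pos (by omega)]; omega
      have hlog3 : logLenA i = 3 := by rw [logLenA]; rw [if_neg (by omega), if_neg (by omega), if_pos (by omega)]
      simp only [produceA, hci, hbase, hlog3]
      norm_num
      have e5 : i / 100 % 10 = i / 100 := by omega
      rw [e5]
      have hq1 : 1 ≤ i / 100 := by omega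
      have hq9 : i / 100 ≤ 9 := by omega
      have hwq : c.getD (i / 100) "" = wordA (i / 100) :=
        hgetD _ (init_isSome_small _ hq1 (by omega))
      have hrC : (if i - i / 100 * 100 = 0 then "" else " and " ++ c.getD (i - i / 100 * 100) "")
          = (if i - i / 100 * 100 = 0 then "" else " and " ++ spell2 (i - i / 100 * 100)) := by
        by_cases hr0 : i - i / 100 * 100 = 0
        · rw [if_pos hr0, if_pos hr0]
        · rw [if_neg hr0, if_neg hr0]
          have hr1 : 1 ≤ i - i / 100 * 100 := by omega
          have hr99 : i - i / 100 * 100 ≤ 99 := by omega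
          cases hbr : initCacheA.get? (i - i / 100 * 100) with
          | some w =>
            rw [hgetD _ (by simp [hbr])]
            simp only [spell2, hbr, wordA, PySem.Dict.getD, Option.getD_some]
          | none =>
            have h21 : 21 ≤ i - i / 100 * 100 := by
              by_contra hlt
              have := init_isSome_small _ hr1 (by omega)
              rw [hbr] at this; simp at this
            have hct : c.get? (i - i / 100 * 100) = some (spell (i - i / 100 * 100)) := by
              have := hInv (i - i / 100 * 100)
              rwa [if_pos ⟨hbr, hr1, by omega⟩] at this
            have hsp2 : spell (i - i / 100 * 100) = spell2 (i - i / 100 * 100) := by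
              simp only [spell, hbr,
                if_pos (show logLenA (i - i / 100 * 100) = 2 by
                  rw [logLenA]; rw [if_neg (by omega), if_pos (by omega)])]
            rw [PySem.Dict.getD, hct]
            simp [hsp2]
      have hval : c.getD (i / 100) "" ++ " hundred" ++
          (if i - i / 100 * 100 = 0 then "" else " and " ++ c.getD (i - i / 100 * 100) "")
          = spell i := by
        rw [hwq, hrC]
        simp only [spell, hbase, if_neg hlog2]
        norm_num [e5]
      refine ⟨hval, ?_⟩
      intro j
      by_cases hj : j = i
      · subst hj
        rw [PySem.Dict.get?_insert_self, hval, if_pos ⟨hbase, by omega, le_refl j⟩]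
      · rw [PySem.Dict.get?_insert_of_ne _ _ hj, hInv j]
        by_cases hc1 : initCacheA.get? j = none ∧ 1 ≤ j ∧ j ≤ i - 1
        · rw [if_pos hc1, if_pos ⟨hc1.1, hc1.2.1, by omega⟩]
        · rw [if_neg hc1, if_neg (by intro h; exact hc1 ⟨h.1, h.2.1, by omega⟩)]

-- letter-count of the base words and of two-digit spellings = B's tables
theorem cnt_spell2_eq (r : Int) (h1 : 1 ≤ r) (h2 : r ≤ 99) : cnt (spell2 r) = lettersB r := by
  by_cases hr20 : r ≤ 20
  · interval_cases r <;> decide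
  · by_cases hrm : r % 10 = 0
    · have : ∃ d : Int, 3 ≤ d ∧ d ≤ 9 ∧ r = 10 * d := ⟨r / 10, by omega, by omega, by omega⟩
      obtain ⟨d, hd1, hd2, rfl⟩ := this
      interval_cases d <;> decide
    · have : ∃ d o : Int, 2 ≤ d ∧ d ≤ 9 ∧ 1 ≤ o ∧ o ≤ 9 ∧ r = 10 * d + o :=
        ⟨r / 10, r % 10, by omega, by omega, by omega, by omega, by omega⟩
      obtain ⟨d, o, hd1, hd2, ho1, ho2, rfl⟩ := this
      interval_cases d <;> interval_cases o <;> decide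

theorem lettersB_eval (i : Int) (h1 : 0 ≤ i) (h2 : i ≤ 999) :
    lettersB i = (if i / 100 ≠ 0 then PySem.List.pyGetD onesTblB (i / 100) 0 + 7 +
        (if i % 100 ≠ 0 then 3 else 0) else 0) +
      (if i % 100 < 20 then PySem.List.pyGetD onesTblB (i % 100) 0
       else PySem.List.pyGetD tensTblB (i % 100 / 10) 0 + PySem.List.pyGetD onesTblB (i % 100 % 10) 0) := by
  rw [lettersB, if_neg (by omega)]
  simp only [fd_eq i 100 (by norm_num), fm_eq i 100 (by norm_num),
    fd_eq (i % 100) 10 (by norm_num), fm_eq (i % 100) 10 (by norm_num)]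
  split_ifs <;> ring
theorem lettersB_small (q : Int) (h1 : 0 ≤ q) (h2 : q ≤ 19) :
    lettersB q = PySem.List.pyGetD onesTblB q 0 := by
  rw [lettersB_eval q (by omega) (by omega)]
  rw [if_neg (by omega : ¬ q / 100 ≠ 0), if_pos (by omega : q % 100 < 20),
    (by omega : q % 100 = q)]
  ring

theorem lettersB_split (i : Int) (h1 : 100 ≤ i) (h2 : i ≤ 999) :
    lettersB i = lettersB (i / 100) + 7 + (if i % 100 ≠ 0 then 3 + lettersB (i % 100) else 0) := by
  rw [lettersB_eval i (by omega) (by omega), lettersB_small (i / 100) (by omega) (by omega)]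
  rw [if_pos (by omega : i / 100 ≠ 0)]
  by_cases hr : i % 100 = 0
  · rw [if_neg (by omega : ¬ i % 100 ≠ 0), if_neg (by omega : ¬ i % 100 ≠ 0),
      if_pos (by omega : i % 100 < 20), hr]
    have : PySem.List.pyGetD onesTblB 0 0 = 0 := by decide
    rw [this]
    ring
  · rw [if_pos (by omega : i % 100 ≠ 0), if_pos (by omega : i % 100 ≠ 0)]
    by_cases hr20 : i % 100 < 20
    · rw [if_pos hr20, lettersB_small (i % 100) (by omega) (by omega)]
      ring
    · rw [if_neg hr20, lettersB_eval (i % 100) (by omega) (by omega)]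
      rw [if_neg (by omega : ¬ i % 100 / 100 ≠ 0), (by omega : i % 100 % 100 = i % 100),
        if_neg hr20]
      ring
theorem cnt_spell (i : Int) (h1 : 1 ≤ i) (h2 : i ≤ 1000) : cnt (spell i) = lettersB i := by
  by_cases hsm : i ≤ 99
  · have hs : spell i = spell2 i := by
      cases hb : initCacheA.get? i with
      | some v => simp only [spell, hb, spell2]
      | none =>
        have h21 : 21 ≤ i := by
          by_contra hlt
          have := init_isSome_small i h1 (by omega)
          rw [hb] at this; simp at this
        simp only [spell, hb,
          if_pos (show logLenA i = 2 by rw [logLenA]; rw [if_neg (by omega), if_pos (by omega)])]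
    rw [hs]; exact cnt_spell2_eq i h1 (by omega)
  · by_cases h100 : i = 100
    · subst h100; decide
    · by_cases h1000 : i = 1000
      · subst h1000; decide
      · have hb : initCacheA.get? i = none := init_none_of i (by omega) (by omega)
        have hlog2 : logLenA i ≠ 2 := by
          rw [logLenA]; rw [if_neg (by omega), if_neg (by omega), if_pos (by omega)]; omega
        simp only [spell, hb, if_neg hlog2]
        norm_num
        rw [(by omega : i / 100 % 10 = i / 100)]
        have hq1 : 1 ≤ i / 100 := by omega
        have hq9 : i / 100 ≤ 9 := by omega
        have hwq : cnt (wordA (i / 100)) = lettersB (i / 100) := by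
          have e : lettersB (i / 100) = PySem.List.pyGetD onesTblB (i / 100) 0 :=
            lettersB_small _ (by omega) (by omega)
          rw [e]
          interval_cases (i / 100) <;> decide
        have hrr : i - i / 100 * 100 = i % 100 := by omega
        have e7 : cnt " hundred" = 7 := by decide
        rw [hrr, cnt_append, cnt_append, lettersB_split i (by omega) (by omega), hwq, e7]
        by_cases hr0 : i % 100 = 0
        · rw [if_pos hr0, if_neg (by omega : ¬ i % 100 ≠ 0)]
          have e0 : cnt "" = 0 := by decide
          rw [e0]
        · rw [if_neg hr0, if_pos (by omega : i % 100 ≠ 0), cnt_append,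
            cnt_spell2_eq (i % 100) (by omega) (by omega)]
          have e3 : cnt " and " = 3 := by decide
          rw [e3]

theorem len_append_str (a b : String) : PySem.Str.len (a ++ b) = PySem.Str.len a + PySem.Str.len b := by
  simp [PySem.Str.len_eq]

theorem lenA_loop (k : Nat) : ∀ (i : Int) (c : PySem.Dict Int String) (s : String),
    1 ≤ i → i + k ≤ 1001 → CacheInv (i - 1) c →
    PySem.Str.len (((intsFrom i k).foldl
      (fun (st : PySem.Dict Int String × String) i =>
        let p := produceA i st.1
        (p.2, st.2 ++ PySem.Str.replace (PySem.Str.replace p.1 " " "") "-" "")) (c, s)).2)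
      = PySem.Str.len s + ((intsFrom i k).map lettersB).sum := by
  induction k with
  | zero => intro i c s _ _ _; simp [intsFrom]
  | succ k ih =>
    intro i c s h1 h2 hInv
    obtain ⟨hval, hinv'⟩ := produce_step i c h1 (by omega) hInv
    simp only [intsFrom, List.foldl_cons, List.map_cons, List.sum_cons]
    rw [ih (i + 1) (produceA i c).2 _ (by omega) (by push_cast at h2 ⊢; omega)
      (by simpa using hinv')]
    rw [len_append_str, hval, strip_cnt, cnt_spell i h1 (by omega)]
    ring

theorem foldl_add_lettersB : ∀ (l : List Int) (a : Int),
    l.foldl (fun acc i => acc + lettersB i) a = a + (l.map lettersB).sum := by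
  intro l
  induction l with
  | nil => intro a; simp
  | cons x xs ih =>
    intro a
    simp only [List.foldl_cons, List.map_cons, List.sum_cons]
    rw [ih]; ring

-- ===== VERDICT (by name: the statement is the Claim_ definition above) =====
theorem num_letter_counts_spec : Claim_equal_num_letter_counts := by
  intro n _ hpre
  have hpre' : n ≤ 1000 := hpre
  unfold Spec_num_letter_counts num_letter_counts num_letter_counts_alt
  by_cases hn : n ≤ 0
  · rw [PySem.List.pyRange_one_eq_nil (by omega : n + 1 ≤ 1)]
    simp [PySem.Str.len_eq]
  · replace hn : 0 < n := by omega
    have hk : (n.toNat : Int) = n := Int.toNat_of_nonneg (by omega)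
    have hrange : PySem.List.pyRange 1 (n + 1) 1 = intsFrom 1 n.toNat := by
      have : n + 1 = 1 + (n.toNat : Int) := by omega
      rw [this, pyRange_eq_intsFrom]
    rw [hrange]
    rw [lenA_loop n.toNat 1 initCacheA "" (by norm_num) (by omega) (by simpa using Inv_init)]
    rw [foldl_add_lettersB]
    simp [PySem.Str.len_eq]
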